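-- pv_equiv track=rewrite | github.com/PxPatel/Glimpse | src/glimpse/policy/policy.py | _matches_exact_patterns
-- ===== SOURCE A (Python) =====
-- from typing import Optional, Set, List, Pattern
--
-- def _matches_exact_patterns(module_name: str, exact_patterns: Set[str]) -> bool:
--     if not exact_patterns:
--         return False
--
--     # Direct exact match - O(1) average case
--     if module_name in exact_patterns:
--         return True
--
--     # Check if it's a submodule of any exact pattern
--     # Optimization: Only check patterns that could be prefixes
--     for pattern in exact_patterns:
--         if len(pattern) < len(module_name) and module_name.startswith(pattern + "."):
--             return True
--
--     return False
-- ===== SOURCE B (Python) =====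
-- def _matches_exact_patterns(module_name: str, exact_patterns) -> bool:
--     if module_name in exact_patterns:
--         return True
--     # test every dot-boundary prefix of module_name against the set
--     return any(ch == "." and module_name[:i] in exact_patterns
--                for i, ch in enumerate(module_name))
-- ===== Notes on version B (the rewrite author's own statement) =====
-- stated objective: alternative
-- what changed: Instead of scanning every pattern and testing startswith(pattern + '.'), B enumerates the dot positions of module_name once and tests each dot-boundary prefix for set membership; it trades the per-pattern scan for per-dot prefix lookups.
import Mathlib
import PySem

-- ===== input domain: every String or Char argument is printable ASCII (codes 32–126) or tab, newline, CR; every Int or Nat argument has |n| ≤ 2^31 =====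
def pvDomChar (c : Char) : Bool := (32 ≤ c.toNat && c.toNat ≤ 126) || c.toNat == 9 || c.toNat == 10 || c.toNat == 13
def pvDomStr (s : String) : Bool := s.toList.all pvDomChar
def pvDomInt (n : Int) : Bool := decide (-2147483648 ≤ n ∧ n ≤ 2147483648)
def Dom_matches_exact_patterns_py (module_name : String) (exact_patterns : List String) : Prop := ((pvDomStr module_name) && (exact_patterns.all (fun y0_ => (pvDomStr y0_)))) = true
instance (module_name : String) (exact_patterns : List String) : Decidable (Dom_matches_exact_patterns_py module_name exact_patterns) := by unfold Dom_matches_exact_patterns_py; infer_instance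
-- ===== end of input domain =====

-- B replaces A's per-pattern startswith scan by one pass over module_name testing each
-- dot-boundary prefix for set membership; objective: alternative (a different traversal, same result).

-- ===== PORT A =====
-- 'pattern + "."' and 'startswith' are ported on the code-point lists (exact: String.toList
-- is a bijection onto code-point sequences and PySem.Chars.startswith is Python's startswith).
def matches_exact_patterns_py (module_name : String) (exact_patterns : List String) : Bool :=
  if exact_patterns.isEmpty then false
  else if exact_patterns.contains module_name then true
  else exact_patterns.any (fun pattern =>
    decide (pattern.toList.length < module_name.toList.length) &&
      PySem.Chars.startswith module_name.toList (pattern.toList ++ ['.']))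

-- ===== PORT B =====
-- 'module_name[:i] in exact_patterns' with i the enumerate index; the slice is exact via
-- PySem.Chars.slice on the code-point list, membership is equality of strings.
def matches_exact_patterns_py_alt (module_name : String) (exact_patterns : List String) : Bool :=
  if exact_patterns.contains module_name then true
  else (PySem.List.enumerate module_name.toList 0).any (fun ic =>
    ic.2 == '.' && exact_patterns.any (fun p =>
      p.toList == PySem.Chars.slice module_name.toList none (some ic.1)))

-- ===== PRECONDITION & SPEC =====
def Spec_matches_exact_patterns_py (module_name : String) (exact_patterns : List String) (out : Bool) : Prop := out = matches_exact_patterns_py_alt module_name exact_patterns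
instance (module_name : String) (exact_patterns : List String) (out : Bool) : Decidable (Spec_matches_exact_patterns_py module_name exact_patterns out) := by unfold Spec_matches_exact_patterns_py; infer_instance

-- ===== CLAIM (what is proved, stated in full; the proofs are below) =====
def Claim_equal_matches_exact_patterns_py : Prop := ∀ (module_name : String) (exact_patterns : List String), Dom_matches_exact_patterns_py module_name exact_patterns → Spec_matches_exact_patterns_py module_name exact_patterns (matches_exact_patterns_py module_name exact_patterns)

-- ===== LEMMAS AND PROOFS =====

-- a list followed by one more element is a prefix of L iff the list is the take at its
-- length, that index is in range, and L carries c there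
theorem append_singleton_prefix_iff (q L : List Char) (c : Char) :
    (q ++ [c]) <+: L ↔ q.length < L.length ∧ L.take q.length = q ∧ L[q.length]? = some c := by
  constructor
  · intro h
    have hlen : q.length + 1 ≤ L.length := by simpa using h.length_le
    have heq : q ++ [c] = L.take (q.length + 1) := by simpa using List.prefix_iff_eq_take.mp h
    refine ⟨by omega, ?_, ?_⟩
    · exact (List.prefix_iff_eq_take.mp ((List.prefix_append q [c]).trans h)).symm
    · have h1 : (L.take (q.length + 1))[q.length]? = L[q.length]? :=
        List.getElem?_take_of_lt (by omega)
      rw [← h1, ← heq]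
      simp
  · rintro ⟨hlt, htake, hget⟩
    have : L.take (q.length + 1) = q ++ [c] := by
      rw [List.take_add_one, htake, hget]
      rfl
    exact this ▸ List.take_prefix _ _

theorem ex_pattern_iff (L : List Char) (pats : List String) :
    (pats.any (fun pattern =>
        decide (pattern.toList.length < L.length) &&
          PySem.Chars.startswith L (pattern.toList ++ ['.']))) = true ↔
      ∃ k, k < L.length ∧ L[k]? = some '.' ∧ ∃ p ∈ pats, p.toList = L.take k := by
  rw [List.any_eq_true]
  constructor
  · rintro ⟨p, hp, hb⟩
    simp only [Bool.and_eq_true, decide_eq_true_eq, PySem.Chars.startswith_iff] at hb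
    obtain ⟨hlen, hpre⟩ := hb
    obtain ⟨hlt, htake, hget⟩ := (append_singleton_prefix_iff _ _ _).1 hpre
    exact ⟨p.toList.length, hlt, hget, p, hp, htake.symm⟩
  · rintro ⟨k, hk, hdot, p, hp, hpl⟩
    refine ⟨p, hp, ?_⟩
    have hlen : p.toList.length = k := by simp [hpl, hk.le]
    simp only [Bool.and_eq_true, decide_eq_true_eq, PySem.Chars.startswith_iff]
    refine ⟨by omega, (append_singleton_prefix_iff _ _ _).2 ?_⟩
    rw [hlen]
    exact ⟨hk, hpl.symm, hdot⟩

theorem ex_dot_iff (L : List Char) (pats : List String) :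
    ((PySem.List.enumerate L 0).any (fun ic =>
        ic.2 == '.' && pats.any (fun p =>
          p.toList == PySem.Chars.slice L none (some ic.1)))) = true ↔
      ∃ k, k < L.length ∧ L[k]? = some '.' ∧ ∃ p ∈ pats, p.toList = L.take k := by
  rw [List.any_eq_true]
  constructor
  · rintro ⟨ic, hmem, hb⟩
    obtain ⟨k, hk, rfl⟩ := (PySem.List.mem_enumerate_iff _ _ _).1 hmem
    simp only [Bool.and_eq_true, beq_iff_eq, List.any_eq_true] at hb
    obtain ⟨hdot, p, hp, hpl⟩ := hb
    refine ⟨k, hk, by rw [List.getElem?_eq_getElem hk]; simpa using hdot, p, hp, ?_⟩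
    simpa [PySem.Chars.slice_eq_listSlice, PySem.List.slice_to_natCast] using hpl
  · rintro ⟨k, hk, hdot, p, hp, hpl⟩
    refine ⟨((k : Int), L[k]'(by simpa using hk)), ?_, ?_⟩
    · exact (PySem.List.mem_enumerate_iff _ _ _).2 ⟨k, by simpa using hk, by simp⟩
    · simp only [Bool.and_eq_true, beq_iff_eq, List.any_eq_true]
      have : L[k] = '.' := by
        have := hdot; rw [List.getElem?_eq_getElem (by simpa using hk)] at this
        simpa using this
      exact ⟨this, p, hp, by simpa [PySem.Chars.slice_eq_listSlice, PySem.List.slice_to_natCast] using hpl⟩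

-- ===== VERDICT (by name: the statement is the Claim_ definition above) =====
theorem matches_exact_patterns_py_spec : Claim_equal_matches_exact_patterns_py := by
  intro m pats _
  unfold Spec_matches_exact_patterns_py matches_exact_patterns_py matches_exact_patterns_py_alt
  by_cases hc : pats.contains m
  · rcases pats with _ | ⟨p, ps⟩ <;> simp_all
  · rcases pats with _ | ⟨p, ps⟩
    · simp
    · simp only [List.isEmpty_cons, hc, if_false, Bool.false_eq_true]
      rw [Bool.eq_iff_iff, ex_pattern_iff m.toList (p :: ps), ex_dot_iff m.toList (p :: ps)]
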